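-- pv_equiv track=rewrite | github.com/basnugroho/roc-treg5 | ncx_reader/ncx_reader.py | get_date_from_str
-- ===== SOURCE A (Python) =====
-- def get_date_from_str(words):
--     underscores = 0
--     dates = []
--     for word in words:
--         if word == "_":
--             underscores += 1
--         if underscores > 3 and len(dates) < 11:
--             dates.append(word)
--     date_str = ''.join([str(elem) for elem in dates])
--     return(date_str[1:])
-- ===== SOURCE B (Python) =====
-- def get_date_from_str(words):
--     idxs = [i for i, w in enumerate(words) if w == "_"]
--     if len(idxs) < 4:
--         return ''
--     i = idxs[3]
--     return ''.join(str(w) for w in words[i + 1:i + 11])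
-- ===== Notes on version B (the rewrite author's own statement) =====
-- stated objective: simpler
-- what changed: Replaces A's flag-driven accumulator scan (underscore counter plus an 11-element buffer, join, then drop the first character) by locating the 4th underscore's index once and directly joining the 10 tokens that follow it.
import Mathlib
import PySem

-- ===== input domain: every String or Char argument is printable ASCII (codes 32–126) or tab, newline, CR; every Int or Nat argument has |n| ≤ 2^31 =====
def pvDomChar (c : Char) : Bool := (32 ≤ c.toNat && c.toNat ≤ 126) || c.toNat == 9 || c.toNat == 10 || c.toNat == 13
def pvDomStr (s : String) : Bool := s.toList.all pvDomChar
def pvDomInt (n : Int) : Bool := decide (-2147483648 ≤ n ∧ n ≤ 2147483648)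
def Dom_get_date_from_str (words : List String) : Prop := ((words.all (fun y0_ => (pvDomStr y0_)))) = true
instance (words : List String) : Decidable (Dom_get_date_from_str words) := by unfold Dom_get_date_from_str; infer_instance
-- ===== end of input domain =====

-- B locates the 4th underscore's index once and joins the 10 tokens after it, instead of A's
-- flag-driven accumulator scan followed by join-and-drop-first-character; same cost, simpler.

-- ===== PORT A =====
-- A's for-loop, state = (underscores, dates)
def pvLoopA (ws : List String) (underscores : Nat) (dates : List String) : List String :=
  match ws with
  | [] => dates
  | w :: rest =>
      let underscores' := if w = "_" then underscores + 1 else underscores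
      let dates' := if underscores' > 3 ∧ dates.length < 11 then dates ++ [w] else dates
      pvLoopA rest underscores' dates'

def get_date_from_str (words : List String) : String :=
  let dates := pvLoopA words 0 []
  let date_str := PySem.Str.join "" dates   -- ''.join([str(elem) for elem in dates]); str of a str is itself
  PySem.Str.slice date_str (some 1) none    -- date_str[1:]

-- ===== PORT B =====
def get_date_from_str_alt (words : List String) : String :=
  let idxs := ((PySem.List.enumerate words 0).filter (fun p => p.2 == "_")).map (·.1)
  if idxs.length < 4 then ""
  else
    match PySem.List.pyGet? idxs 3 with     -- idxs[3]; in range since len(idxs) ≥ 4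
    | some i => PySem.Str.join "" (PySem.List.slice words (some (i + 1)) (some (i + 11)))
    | none => ""

-- ===== PRECONDITION & SPEC =====
def Spec_get_date_from_str (words : List String) (out : String) : Prop := out = get_date_from_str_alt words
instance (words : List String) (out : String) : Decidable (Spec_get_date_from_str words out) := by unfold Spec_get_date_from_str; infer_instance

-- ===== CLAIM (what is proved, stated in full; the proofs are below) =====
def Claim_equal_get_date_from_str : Prop := ∀ (words : List String), Dom_get_date_from_str words → Spec_get_date_from_str words (get_date_from_str words)

-- ===== LEMMAS AND PROOFS =====

def pvIdxK (k : Nat) (ws : List String) : Option Nat :=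
  match ws with
  | [] => none
  | w :: rest =>
      if w = "_" then
        if k = 1 then some 0 else (pvIdxK (k - 1) rest).map (· + 1)
      else (pvIdxK k rest).map (· + 1)

theorem pvLoopA_phase2 (ws : List String) : ∀ (us : Nat) (dates : List String), 3 < us →
    pvLoopA ws us dates = dates ++ ws.take (11 - dates.length) := by
  induction ws with
  | nil => intro us dates _; simp [pvLoopA]
  | cons w rest ih =>
    intro us dates hus
    have hus' : 3 < (if w = "_" then us + 1 else us) := by split <;> omega
    show pvLoopA rest _ _ = _
    rw [ih _ _ hus']
    by_cases hlen : dates.length < 11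
    · rw [if_pos ⟨hus', hlen⟩]
      have h11 : 11 - dates.length = (11 - (dates ++ [w]).length) + 1 := by simp; omega
      rw [h11, List.take_succ_cons]
      simp
    · rw [if_neg (by intro hc; exact hlen hc.2)]
      have h0 : 11 - dates.length = 0 := by omega
      rw [h0]
      simp

theorem pvIdxK_cons_one (rest : List String) : pvIdxK 1 ("_" :: rest) = some 0 := by
  simp [pvIdxK]

theorem pvIdxK_cons_us (k : Nat) (rest : List String) (hk : k ≠ 1) :
    pvIdxK k ("_" :: rest) = (pvIdxK (k - 1) rest).map (· + 1) := by
  rw [pvIdxK]; simp [hk]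

theorem pvIdxK_cons_other (w : String) (k : Nat) (rest : List String) (hw : w ≠ "_") :
    pvIdxK k (w :: rest) = (pvIdxK k rest).map (· + 1) := by
  rw [pvIdxK]; simp [hw]

theorem pvLoopA_phase1 (ws : List String) : ∀ (us : Nat), us ≤ 3 →
    pvLoopA ws us [] = (match pvIdxK (4 - us) ws with
      | none => []
      | some i => (ws.drop i).take 11) := by
  induction ws with
  | nil => intro us _; simp [pvLoopA, pvIdxK]
  | cons w rest ih =>
    intro us hus
    by_cases hw : w = "_"
    · subst hw
      by_cases h3 : us = 3
      · subst h3
        rw [show pvLoopA ("_"::rest) 3 [] = pvLoopA rest 4 ["_"] from by simp [pvLoopA]]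
        rw [pvLoopA_phase2 rest 4 _ (by omega)]
        simp [pvIdxK]
      · have hlt : ¬ 3 ≤ us := by omega
        rw [show pvLoopA ("_"::rest) us [] = pvLoopA rest (us+1) [] from by simp [pvLoopA, hlt]]
        rw [ih (us + 1) (by omega)]
        have hk : ¬ (4 - us = 1) := by omega
        have hk2 : 4 - us - 1 = 4 - (us + 1) := by omega
        simp only [pvIdxK, if_neg hk, hk2]
        cases pvIdxK (4 - (us + 1)) rest <;> simp
    · have hlt : ¬ 3 < us := by omega
      rw [show pvLoopA (w::rest) us [] = pvLoopA rest us [] from by simp [pvLoopA, hw, hlt]]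
      rw [ih us hus]
      simp only [pvIdxK, if_neg hw]
      cases pvIdxK (4 - us) rest <;> simp

theorem pvIdxs_get? (ws : List String) : ∀ (s : Int) (k : Nat),
    (((PySem.List.enumerate ws s).filter (fun p => p.2 == "_")).map (·.1))[k]? =
      (pvIdxK (k + 1) ws).map (fun i : Nat => s + (i : Int)) := by
  induction ws with
  | nil => intro s k; simp [PySem.List.enumerate, pvIdxK]
  | cons w rest ih =>
    intro s k
    rw [PySem.List.enumerate_cons]
    by_cases hw : w = "_"
    · subst hw
      rw [List.filter_cons_of_pos (by simp), List.map_cons]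
      cases k with
      | zero => rw [pvIdxK_cons_one]; simp
      | succ k' =>
        rw [List.getElem?_cons_succ, ih (s + 1) k',
            pvIdxK_cons_us (k' + 1 + 1) rest (by omega),
            show k' + 1 + 1 - 1 = k' + 1 from by omega]
        cases pvIdxK (k' + 1) rest <;> simp <;> ring
    · rw [List.filter_cons_of_neg (by simp [hw]), ih (s + 1) k,
          pvIdxK_cons_other w (k + 1) rest hw]
      cases pvIdxK (k + 1) rest <;> simp <;> ring

theorem pvIdxK_drop (k : Nat) (ws : List String) (i : Nat) (h : pvIdxK k ws = some i) :
    ∃ rest, ws.drop i = "_" :: rest := by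
  induction ws generalizing k i with
  | nil => simp [pvIdxK] at h
  | cons w tail ih =>
    simp only [pvIdxK] at h
    by_cases hw : w = "_"
    · rw [if_pos hw] at h
      by_cases h1 : k = 1
      · rw [if_pos h1] at h
        cases h
        exact ⟨tail, by simp [hw]⟩
      · rw [if_neg h1] at h
        cases hj : pvIdxK (k - 1) tail with
        | none => rw [hj] at h; simp at h
        | some j =>
          rw [hj] at h; simp at h
          obtain ⟨rest, hr⟩ := ih _ _ hj
          exact ⟨rest, by rw [← h]; simpa using hr⟩
    · rw [if_neg hw] at h
      cases hj : pvIdxK k tail with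
      | none => rw [hj] at h; simp at h
      | some j =>
        rw [hj] at h; simp at h
        obtain ⟨rest, hr⟩ := ih _ _ hj
        exact ⟨rest, by rw [← h]; simpa using hr⟩

theorem pvJoin_empty_cons (p : List Char) (l : List (List Char)) :
    PySem.Chars.join [] (p :: l) = p ++ PySem.Chars.join [] l := by
  cases l with
  | nil => simp [PySem.Chars.join_singleton, PySem.Chars.join_nil]
  | cons q r => rw [PySem.Chars.join_cons_cons]; simp


theorem pv_main (words : List String) : get_date_from_str words = get_date_from_str_alt words := by
  unfold get_date_from_str get_date_from_str_alt
  have hA := pvLoopA_phase1 words 0 (by omega)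
  simp only [Nat.sub_zero] at hA
  have hB : (((PySem.List.enumerate words 0).filter (fun p => p.2 == "_")).map (·.1))[3]? =
      (pvIdxK 4 words).map (fun i : Nat => (i : Int)) := by
    simpa using pvIdxs_get? words 0 3
  cases hidx : pvIdxK 4 words with
  | none =>
    rw [hidx] at hA hB
    rw [Option.map_none] at hB
    have hlen : (((PySem.List.enumerate words 0).filter (fun p => p.2 == "_")).map (·.1)).length < 4 := by
      by_contra hc
      rw [List.getElem?_eq_getElem (by omega)] at hB
      simp at hB
    rw [hA, if_pos hlen]
    rfl
  | some i =>
    rw [hidx] at hA hB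
    rw [Option.map_some] at hB
    have hlen : ¬ (((PySem.List.enumerate words 0).filter (fun p => p.2 == "_")).map (·.1)).length < 4 := by
      intro hc
      rw [List.getElem?_eq_none (by omega)] at hB
      simp at hB
    have hget : PySem.List.pyGet? (((PySem.List.enumerate words 0).filter (fun p => p.2 == "_")).map (·.1)) 3 = some ((i : Int)) := by
      rw [show (3 : Int) = ((3 : Nat) : Int) from rfl, PySem.List.pyGet?_natCast, hB]
    rw [hA, if_neg hlen, hget]
    dsimp only
    obtain ⟨rest, hdrop⟩ := pvIdxK_drop 4 words i hidx
    have hr : words.drop (i + 1) = rest := by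
      rw [← List.drop_drop, hdrop]; simp
    have hslice : PySem.List.slice words (some ((i : Int) + 1)) (some ((i : Int) + 11)) = rest.take 10 := by
      rw [PySem.List.slice_toNat words (by positivity) (by positivity)]
      have h1 : ((i : Int) + 1).toNat = i + 1 := by omega
      have h2 : ((i : Int) + 11).toNat = i + 11 := by omega
      rw [h1, h2, hr]
      congr 1
      omega
    rw [hslice, hdrop]
    apply String.toList_inj.mp
    rw [PySem.Str.toList_slice, PySem.Chars.slice_eq_listSlice, PySem.Str.toList_join,
        PySem.Str.toList_join, show (11 : Nat) = 10 + 1 from rfl, List.take_succ_cons,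
        List.map_cons]
    rw [show ("" : String).toList = [] from rfl, pvJoin_empty_cons,
        PySem.List.slice_from _ (by omega)]
    simp

-- ===== VERDICT (by name: the statement is the Claim_ definition above) =====
theorem get_date_from_str_spec : Claim_equal_get_date_from_str := by
  intro words _
  unfold Spec_get_date_from_str
  exact pv_main words
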